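-- pv_equiv track=rewrite | github.com/alexKleider/Letter | convert_g.py | complete_record
-- ===== SOURCE A (Python) =====
-- my_fields = ("prefix","first","initial","last","suffix","company",
--             "phone","address","address1","town","state",
--             "postal_code","country","email","extra",)
--
-- def complete_record(collected_fields):
--     ret = {}
--     collected_keys = collected_fields.keys()
--     for key in my_fields:
--         if key in collected_keys:
--             ret[key] = collected_fields[key]
--         else:
--             ret[key] = ''
--     return ret
-- ===== SOURCE B (Python) =====
-- my_fields = ("prefix","first","initial","last","suffix","company",
--             "phone","address","address1","town","state",
--             "postal_code","country","email","extra",)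
--
-- def complete_record(collected_fields):
--     ret = dict.fromkeys(my_fields, '')
--     wanted = set(my_fields)
--     for key, value in collected_fields.items():
--         if key in wanted:
--             ret[key] = value
--     return ret
-- ===== Notes on version B (the rewrite author's own statement) =====
-- stated objective: alternative
-- what changed: B pre-fills every field with '' via dict.fromkeys(my_fields, '') and then overlays the supplied values by iterating the input dict's items (filtered through a set of my_fields), instead of iterating the fixed field list and looking each field up in the input.
import Mathlib
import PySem

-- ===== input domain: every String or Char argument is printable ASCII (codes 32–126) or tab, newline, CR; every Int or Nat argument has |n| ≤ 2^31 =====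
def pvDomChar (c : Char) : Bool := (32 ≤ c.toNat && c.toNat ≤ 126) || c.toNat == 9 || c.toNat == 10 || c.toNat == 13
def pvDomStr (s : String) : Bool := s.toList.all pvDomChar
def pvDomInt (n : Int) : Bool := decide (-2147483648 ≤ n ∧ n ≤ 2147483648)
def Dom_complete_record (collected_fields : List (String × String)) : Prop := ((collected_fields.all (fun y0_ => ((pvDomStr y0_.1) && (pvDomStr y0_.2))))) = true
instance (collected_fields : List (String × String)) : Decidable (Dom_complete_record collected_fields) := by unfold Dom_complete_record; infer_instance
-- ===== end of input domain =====

-- B builds the full default record first and overlays the input's items over it (input-driven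
-- second pass), instead of A's single pass over the fixed field list with per-field lookup;
-- same cost, different decomposition.

-- ===== PORT A =====
def my_fields : List String :=
  ["prefix","first","initial","last","suffix","company",
   "phone","address","address1","town","state",
   "postal_code","country","email","extra"]

def complete_record (collected_fields : List (String × String)) : List (String × String) :=
  let collected_keys := collected_fields.map (·.1)
  (my_fields.foldl (fun ret key =>
      if collected_keys.contains key then
        ret.insert key (((PySem.Dict.mk collected_fields).get? key).getD "")
      else
        ret.insert key "")
    PySem.Dict.empty).items

-- ===== PORT B =====
def complete_record_alt (collected_fields : List (String × String)) : List (String × String) :=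
  let ret0 : PySem.Dict String String :=
    my_fields.foldl (fun d k => d.insert k "") PySem.Dict.empty
  let wanted := PySem.Set.ofList my_fields
  (collected_fields.foldl (fun d p =>
      if wanted.contains p.1 then d.insert p.1 p.2 else d) ret0).items

-- ===== PRECONDITION & SPEC =====
-- Pre_ excludes association lists with duplicate keys: they do not arise from a Python dict
-- argument, and which duplicate wins (A's first-match lookup vs B's last-write overlay) is
-- accidental at the list level.
def Pre_complete_record (collected_fields : List (String × String)) : Prop :=
  (collected_fields.map Prod.fst).Nodup
instance (collected_fields : List (String × String)) : Decidable (Pre_complete_record collected_fields) := by unfold Pre_complete_record; infer_instance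

def pvWitness_complete_record : (List (String × String)) := [("first", "Alex"), ("junk", "z")]

def Spec_complete_record (collected_fields : List (String × String)) (out : List (String × String)) : Prop := out = complete_record_alt collected_fields
instance (collected_fields : List (String × String)) (out : List (String × String)) : Decidable (Spec_complete_record collected_fields out) := by unfold Spec_complete_record; infer_instance

-- ===== CLAIM (what is proved, stated in full; the proofs are below) =====
def Claim_equal_complete_record : Prop := ∀ (collected_fields : List (String × String)), Dom_complete_record collected_fields → Pre_complete_record collected_fields → Spec_complete_record collected_fields (complete_record collected_fields)

-- ===== LEMMAS AND PROOFS =====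

-- the common value of both records at field k
def recVal (cf : List (String × String)) (k : String) : String :=
  ((PySem.Dict.mk cf).get? k).getD ""

lemma my_fields_nodup : my_fields.Nodup := by decide

-- A's result is my_fields mapped through recVal
lemma A_items (cf : List (String × String)) :
    complete_record cf = my_fields.map (fun k => (k, recVal cf k)) := by
  unfold complete_record
  have hstep :
      (fun (ret : PySem.Dict String String) key =>
        if (cf.map (·.1)).contains key then
          ret.insert key (((PySem.Dict.mk cf).get? key).getD "")
        else ret.insert key "")
      = (fun ret key => ret.insert key (recVal cf key)) := by
    funext ret key
    by_cases h : (cf.map (·.1)).contains key = true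
    · rw [if_pos h]; rfl
    · rw [if_neg h]
      have hnone : (PySem.Dict.mk cf).get? key = none := by
        rw [PySem.Dict.get?_eq_none_iff_not_mem_keys]
        simpa [PySem.Dict.keys] using h
      simp only [recVal, hnone, Option.getD_none]
  dsimp only
  rw [hstep]
  have := PySem.Dict.items_foldl_insert_fresh (l := my_fields) (k := id)
    (v := fun a => recVal cf a) (d := (PySem.Dict.empty : PySem.Dict String String))
    (by intro a _; simp) (by simpa using my_fields_nodup)
  simpa using this

-- getD through B's overlay loop, for duplicate-free cf
lemma B_getD (cf : List (String × String)) (h : (cf.map Prod.fst).Nodup)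
    (d : PySem.Dict String String) (k : String) :
    (cf.foldl (fun d p =>
        if my_fields.contains p.1 then d.insert p.1 p.2 else d) d).getD k ""
      = if my_fields.contains k then
          ((PySem.Dict.mk cf).get? k).getD (d.getD k "")
        else d.getD k "" := by
  induction cf generalizing d with
  | nil =>
    simp only [List.foldl_nil]
    split <;> rfl
  | cons p rest ih =>
    obtain ⟨a, b⟩ := p
    simp only [List.map_cons, List.nodup_cons] at h
    obtain ⟨hp, hrest⟩ := h
    have hnone : (PySem.Dict.mk rest).get? a = none := by
      rw [PySem.Dict.get?_eq_none_iff_not_mem_keys]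
      simpa [PySem.Dict.keys] using hp
    simp only [List.foldl_cons]
    rw [ih hrest, PySem.Dict.get?_mk_cons]
    by_cases hk : k = a
    · subst hk
      by_cases hw : my_fields.contains k = true
      · rw [if_pos hw, if_pos hw, if_pos hw, hnone]
        simp [PySem.Dict.getD_insert_self]
      · rw [if_neg hw, if_neg hw, if_neg hw]
    · have hba : (a == k) = false := by
        simp [Ne.symm hk]
      rw [hba]
      simp only [Bool.false_eq_true, if_false]
      by_cases hw : my_fields.contains a = true
      · rw [if_pos hw, PySem.Dict.getD_insert]
        rw [if_neg hk]
      · rw [if_neg hw]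

-- B's overlay loop never adds a key when every wanted key is already present
lemma B_keys (cf : List (String × String)) (d : PySem.Dict String String)
    (hd : ∀ k, my_fields.contains k = true → d.contains k = true) :
    (cf.foldl (fun d p =>
        if my_fields.contains p.1 then d.insert p.1 p.2 else d) d).keys
      = d.keys := by
  induction cf generalizing d with
  | nil => rfl
  | cons p rest ih =>
    simp only [List.foldl_cons]
    by_cases hw : my_fields.contains p.1 = true
    · rw [if_pos hw]
      rw [ih]
      · exact PySem.Dict.keys_insert_of_contains _ _ (hd _ hw)
      · intro k hk
        rw [PySem.Dict.contains_insert]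
        simp [hd k hk]
    · rw [if_neg hw]
      exact ih d hd

-- the default table dict.fromkeys(my_fields, '')
lemma ret0_items :
    (my_fields.foldl (fun d k => d.insert k "") PySem.Dict.empty).items
      = my_fields.map (fun k => (k, "")) := by
  have := PySem.Dict.items_foldl_insert_fresh (l := my_fields) (k := id)
    (v := fun _ => "") (d := (PySem.Dict.empty : PySem.Dict String String))
    (by intro a _; simp) (by simpa using my_fields_nodup)
  simpa using this

lemma ret0_getD (k : String) :
    (my_fields.foldl (fun d k => d.insert k "") PySem.Dict.empty).getD k "" = "" := by
  have H : ∀ (l : List String) (d : PySem.Dict String String),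
      (∀ j, d.getD j "" = "") →
      (l.foldl (fun d k => d.insert k "") d).getD k "" = "" := by
    intro l
    induction l with
    | nil => intro d hd; exact hd k
    | cons a rest ih =>
      intro d hd
      simp only [List.foldl_cons]
      apply ih
      intro j
      rw [PySem.Dict.getD_insert]
      split <;> simp [hd]
  exact H my_fields PySem.Dict.empty (by intro j; simp)

lemma B_items (cf : List (String × String)) (h : (cf.map Prod.fst).Nodup) :
    complete_record_alt cf = my_fields.map (fun k => (k, recVal cf k)) := by
  unfold complete_record_alt
  dsimp only
  have hstep :
      (fun (d : PySem.Dict String String) (p : String × String) =>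
        if (PySem.Set.ofList my_fields).contains p.1 then d.insert p.1 p.2 else d)
      = (fun d p => if my_fields.contains p.1 then d.insert p.1 p.2 else d) := by
    funext d p
    have hset : PySem.Set.ofList my_fields = my_fields := by decide
    rw [hset]; rfl
  rw [hstep]
  set ret0 := my_fields.foldl (fun d k => d.insert k "") PySem.Dict.empty with hret0
  have hkeys0 : ret0.keys = my_fields := by
    have h0 : ret0.items = my_fields.map (fun k => (k, "")) := ret0_items
    rw [PySem.Dict.keys, h0, List.map_map]
    exact List.map_id my_fields
  have hd0 : ∀ k, my_fields.contains k = true → ret0.contains k = true := by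
    intro k hk
    rw [PySem.Dict.contains_iff_mem_keys, hkeys0]
    simpa using hk
  set res := cf.foldl (fun d p =>
      if my_fields.contains p.1 then d.insert p.1 p.2 else d) ret0 with hres
  have hk : res.keys = my_fields := by rw [hres, B_keys cf ret0 hd0, hkeys0]
  have hnd : res.keys.Nodup := by rw [hk]; exact my_fields_nodup
  rw [PySem.Dict.items_eq_map_keys res hnd "", hk]
  apply List.map_congr_left
  intro k hkmem
  have hw : my_fields.contains k = true := by simpa using hkmem
  rw [hres, B_getD cf h ret0 k, if_pos hw, ret0_getD]
  rfl

-- ===== VERDICT (by name: the statement is the Claim_ definition above) =====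
theorem complete_record_spec : Claim_equal_complete_record := by
  intro cf _ hpre
  unfold Spec_complete_record
  rw [A_items cf, B_items cf hpre]
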